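-- pv_equiv track=rewrite | github.com/bzraa/icsi254-aad-problems-2026-spring | palindrom/testchecker.py | is_double_palindrome
-- ===== SOURCE A (Python) =====
-- def is_palindrome(s):
--     return s == s[::-1]
--
-- def is_double_palindrome(s):
--     n = len(s)
--     if n == 0: return False
--     if is_palindrome(s):
--         return True
--     for i in range(1, n):
--         if is_palindrome(s[:i]) and is_palindrome(s[i:]):
--             return True
--     return False
-- ===== SOURCE B (Python) =====
-- def is_double_palindrome(s):
--     # Interval DP over substring length: row m holds "s[i:i+m] is a palindrome"
--     # flags, built from row m-2 by the recurrence
--     #   pal(i, m) = (s[i] == s[i+m-1]) and pal(i+1, m-2)   (lengths 0 and 1 are True);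
--     # each row contributes its prefix flag (i = 0) and suffix flag (i = n-m),
--     # and the answer reads the splits off the two flag arrays.
--     # No slicing, no reversed copies, no per-split palindrome scan.
--     n = len(s)
--     if n == 0:
--         return False
--     pref = []          # pref[m]: s[:m] is a palindrome
--     suff = []          # suff[k]: s[k:] is a palindrome (built back to front)
--     older, last = [], []
--     for m in range(n + 1):
--         if m <= 1:
--             row = [True] * (n - m + 1)
--         else:
--             row = [s[i] == s[i + m - 1] and older[i + 1] for i in range(n - m + 1)]
--         older, last = last, row
--         pref.append(row[0])
--         suff.insert(0, row[n - m])
--     return any(p and q for p, q in zip(pref, suff))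
-- ===== Notes on version B (the rewrite author's own statement) =====
-- stated objective: alternative
-- what changed: Replaced A's per-split slice-and-reverse palindrome tests by an interval dynamic program: palindromicity flags for all substrings are built row by row over substring length from the recurrence pal(i,m) = (s[i]==s[i+m-1]) and pal(i+1,m-2), each row contributing one prefix flag and one suffix flag, and the answer is read off the two precomputed flag arrays with no per-split palindrome scan.
import Mathlib
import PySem

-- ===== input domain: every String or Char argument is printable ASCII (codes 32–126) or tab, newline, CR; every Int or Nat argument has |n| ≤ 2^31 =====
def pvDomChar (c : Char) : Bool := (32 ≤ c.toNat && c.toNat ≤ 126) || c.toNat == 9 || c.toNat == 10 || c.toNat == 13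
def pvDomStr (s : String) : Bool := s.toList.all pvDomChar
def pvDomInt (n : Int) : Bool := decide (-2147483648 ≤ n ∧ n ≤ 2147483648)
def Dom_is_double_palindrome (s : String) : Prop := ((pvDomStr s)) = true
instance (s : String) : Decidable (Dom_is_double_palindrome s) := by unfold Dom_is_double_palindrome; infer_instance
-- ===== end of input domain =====

-- B replaces A's per-split slice-and-reverse palindrome tests by an interval DP that builds
-- palindromicity flags row by row over substring length and reads the splits off two flag arrays
-- (alternative algorithm of the same asymptotic cost, not faster).


-- ===== PORT A =====
-- is_palindrome(s): s == s[::-1]; s[::-1] on a string is exactly reversal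
def pvIsPalA (l : List Char) : Bool := l == l.reverse

def is_double_palindrome (s : String) : Bool :=
  let l := s.toList
  let n := l.length
  if n == 0 then false
  else if pvIsPalA l then true
  else
    (PySem.List.pyRange 1 (n : Int) 1).any fun i =>
      pvIsPalA (PySem.List.slice l none (some i)) && pvIsPalA (PySem.List.slice l (some i) none)

-- ===== PORT B =====
-- row of DP flags for substring length m, from the row for length m-2:
-- [s[i] == s[i+m-1] and older[i+1] for i in range(n-m+1)] (lengths 0,1: all True).
-- Python's s[i], s[i+m-1] and older[i+1] are always in range here, so getD with a
-- dummy default is exact.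
def pvRowB (l : List Char) (older : List Bool) (m : Nat) : List Bool :=
  if m ≤ 1 then List.replicate (l.length - m + 1) true
  else (List.range (l.length - m + 1)).map fun i =>
    (l.getD i ' ' == l.getD (i + m - 1) ' ') && older.getD (i + 1) false

-- loop body over m; state (pref, suff, older, last): older, last = last, row;
-- pref.append(row[0]); suff.insert(0, row[n-m])
def pvStepB (l : List Char) (st : List Bool × List Bool × List Bool × List Bool) (m : Nat) :
    List Bool × List Bool × List Bool × List Bool :=
  let row := pvRowB l st.2.2.1 m
  (st.1 ++ [row.getD 0 false], row.getD (l.length - m) false :: st.2.1, st.2.2.2, row)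

def is_double_palindrome_alt (s : String) : Bool :=
  let l := s.toList
  let n := l.length
  if n == 0 then false
  else
    let st := (List.range (n + 1)).foldl (pvStepB l) ([], [], [], [])
    (st.1.zip st.2.1).any fun p => p.1 && p.2

-- ===== PRECONDITION & SPEC =====
def Spec_is_double_palindrome (s : String) (out : Bool) : Prop := out = is_double_palindrome_alt s
instance (s : String) (out : Bool) : Decidable (Spec_is_double_palindrome s out) := by unfold Spec_is_double_palindrome; infer_instance

-- ===== CLAIM (what is proved, stated in full; the proofs are below) =====
def Claim_equal_is_double_palindrome : Prop := ∀ (s : String), Dom_is_double_palindrome s → Spec_is_double_palindrome s (is_double_palindrome s)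

-- ===== LEMMAS AND PROOFS =====

-- lists of length ≤ 1 are palindromes
theorem pvPal_short (xs : List Char) (h : xs.length ≤ 1) : pvIsPalA xs = true := by
  rcases xs with _ | ⟨a, _ | ⟨b, tl⟩⟩
  · simp [pvIsPalA]
  · simp [pvIsPalA]
  · simp at h

-- peeling both ends of a palindrome test
theorem pvPal_step (a b : Char) (xs : List Char) :
    pvIsPalA (a :: (xs ++ [b])) = ((a == b) && pvIsPalA xs) := by
  unfold pvIsPalA
  rw [Bool.eq_iff_iff]
  simp only [Bool.and_eq_true, beq_iff_eq, List.reverse_cons, List.reverse_append,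
    List.reverse_nil, List.nil_append, List.cons_append, List.cons.injEq]
  constructor
  · rintro ⟨rfl, h⟩
    obtain ⟨h1, -⟩ := List.append_inj' h (by simp)
    exact ⟨rfl, h1⟩
  · rintro ⟨rfl, h1⟩
    exact ⟨rfl, by rw [← h1]⟩

-- the window s[i:i+m'+2] decomposed as first char, middle window, last char
theorem pvWindow (l : List Char) (i m' : Nat) (him : i + m' + 2 ≤ l.length) :
    (l.drop i).take (m' + 2) =
      l[i]'(by omega) :: (((l.drop (i + 1)).take m') ++ [l[i + m' + 1]'(by omega)]) := by
  rw [List.drop_eq_getElem_cons (show i < l.length by omega)]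
  rw [show m' + 2 = (m' + 1) + 1 from rfl, List.take_succ_cons]
  congr 1
  rw [List.take_add_one]
  congr 1
  have hlt : m' < (l.drop (i + 1)).length := by simp; omega
  rw [List.getElem?_eq_getElem hlt]
  simp only [List.getElem_drop, Option.toList_some]
  congr 2
  omega

-- the intended value of the row for length m
def pvRowSpec (l : List Char) (m : Nat) : List Bool :=
  (List.range (l.length - m + 1)).map fun i => pvIsPalA ((l.drop i).take m)

-- entries of pvRowSpec
theorem pvRowSpec_getD (l : List Char) (m j : Nat) (hj : j < l.length - m + 1) :
    (pvRowSpec l m).getD j false = pvIsPalA ((l.drop j).take m) := by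
  unfold pvRowSpec
  rw [List.getD_eq_getElem _ _ (by simpa using hj)]
  simp

-- the loop body computes the intended row
theorem pvRowB_all (l : List Char) (m : Nat) (hm : m ≤ l.length) :
    pvRowB l (if 2 ≤ m then pvRowSpec l (m - 2) else []) m = pvRowSpec l m := by
  by_cases h2 : 2 ≤ m
  · rw [if_pos h2]
    obtain ⟨m', rfl⟩ : ∃ m', m = m' + 2 := ⟨m - 2, by omega⟩
    unfold pvRowB pvRowSpec
    rw [if_neg (by omega)]
    simp only [Nat.add_sub_cancel]
    apply List.map_congr_left
    intro i hi
    rw [List.mem_range] at hi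
    have him : i + m' + 2 ≤ l.length := by omega
    rw [pvWindow l i m' him, pvPal_step]
    rw [List.getD_eq_getElem l _ (by omega), List.getD_eq_getElem l _ (by omega)]
    have hmem : i + 1 < l.length - m' + 1 := by omega
    rw [List.getD_eq_getElem _ _ (by simpa using hmem), List.getElem_map, List.getElem_range]
    congr 2
  · rw [if_neg h2]
    unfold pvRowB pvRowSpec
    rw [if_pos (by omega)]
    symm
    apply List.eq_replicate_iff.mpr
    refine ⟨by simp, ?_⟩
    intro b hb
    rw [List.mem_map] at hb
    obtain ⟨i, -, rfl⟩ := hb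
    exact pvPal_short _ (by simp; omega)

-- invariant of B's fold over range t
theorem pvFoldB (l : List Char) (t : Nat) (ht : t ≤ l.length + 1) :
    (List.range t).foldl (pvStepB l) ([], [], [], []) =
      ((List.range t).map (fun m => pvIsPalA (l.take m)),
       ((List.range t).map (fun m => pvIsPalA (l.drop (l.length - m)))).reverse,
       (if 2 ≤ t then pvRowSpec l (t - 2) else []),
       (if 1 ≤ t then pvRowSpec l (t - 1) else [])) := by
  induction t with
  | zero => simp
  | succ t ih =>
    have htl : t ≤ l.length := by omega
    rw [List.range_succ, List.foldl_append, ih (by omega), List.foldl_cons, List.foldl_nil]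
    have hrow : pvRowB l (if 2 ≤ t then pvRowSpec l (t - 2) else []) t = pvRowSpec l t :=
      pvRowB_all l t htl
    simp only [pvStepB, hrow, Prod.mk.injEq, List.map_append, List.map_cons, List.map_nil,
      List.reverse_append, List.reverse_cons, List.reverse_nil, List.nil_append,
      List.cons_append]
    refine ⟨?_, ?_, ?_, ?_⟩
    · congr 2
      rw [pvRowSpec_getD l t 0 (by omega)]
      simp
    · congr 1
      rw [pvRowSpec_getD l t (l.length - t) (by omega)]
      rw [List.take_of_length_le (by simp; omega)]
    · by_cases h1 : 1 ≤ t
      · rw [if_pos h1, if_pos (show 2 ≤ t + 1 by omega)]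
        congr 1
      · rw [if_neg h1, if_neg (show ¬ 2 ≤ t + 1 by omega)]
    · rw [if_pos (show 1 ≤ t + 1 by omega)]
      simp only [Nat.add_sub_cancel]

-- zip of the prefix-flag list with the (reversed) suffix-flag list, index-wise
theorem pvZipRev (f g : Nat → Bool) (k : Nat) :
    (((List.range k).map f).zip (((List.range k).map g).reverse)) =
      (List.range k).map (fun i => (f i, g (k - 1 - i))) := by
  apply List.ext_getElem
  · simp
  · intro i h1 h2
    simp only [List.getElem_zip, List.getElem_map, List.getElem_range, List.getElem_reverse,
      List.length_map, List.length_range]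

-- the two ports agree on every string
theorem pvMain (l : List Char) :
    is_double_palindrome (String.ofList l) = is_double_palindrome_alt (String.ofList l) := by
  unfold is_double_palindrome is_double_palindrome_alt
  simp only [String.toList_ofList]
  rcases Nat.eq_zero_or_pos l.length with h0 | h0
  · simp [h0]
  · have hne : ¬((l.length == 0) = true) := by simp only [beq_iff_eq]; omega
    rw [if_neg hne, if_neg hne]
    rw [pvFoldB l (l.length + 1) (by omega)]
    rw [pvZipRev]
    have hB : (((List.range (l.length + 1)).map
        (fun i => (pvIsPalA (l.take i),
          pvIsPalA (l.drop (l.length - (l.length + 1 - 1 - i)))))).any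
        fun p => p.1 && p.2) = true ↔
        ∃ i, i ≤ l.length ∧ pvIsPalA (l.take i) = true ∧ pvIsPalA (l.drop i) = true := by
      simp only [List.any_map, List.any_eq_true, List.mem_range, Function.comp_apply,
        Bool.and_eq_true]
      constructor
      · rintro ⟨i, hi, h1, h2⟩
        have he : l.length - (l.length + 1 - 1 - i) = i := by omega
        rw [he] at h2
        exact ⟨i, by omega, h1, h2⟩
      · rintro ⟨i, hi, h1, h2⟩
        refine ⟨i, by omega, h1, ?_⟩
        have he : l.length - (l.length + 1 - 1 - i) = i := by omega
        rw [he]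
        exact h2
    by_cases hp : pvIsPalA l = true
    · rw [if_pos hp, Bool.eq_iff_iff, hB]
      simp only [true_iff]
      exact ⟨0, by omega, by simp [pvIsPalA], by simpa using hp⟩
    · rw [if_neg hp, Bool.eq_iff_iff, hB]
      simp only [List.any_eq_true, Bool.and_eq_true]
      constructor
      · rintro ⟨i, hmem, hi⟩
        rw [PySem.List.mem_pyRange_one] at hmem
        obtain ⟨h1, h2⟩ := hmem
        have hnn : (0:Int) ≤ i := by omega
        rw [PySem.List.slice_to l hnn, PySem.List.slice_from l hnn] at hi
        exact ⟨i.toNat, by omega, hi.1, hi.2⟩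
      · rintro ⟨i, hi, h1, h2⟩
        have hi0 : i ≠ 0 := by
          rintro rfl
          rw [List.drop_zero] at h2
          exact hp h2
        have hin : i ≠ l.length := by
          rintro rfl
          rw [List.take_length] at h1
          exact hp h1
        refine ⟨(i : Int), by rw [PySem.List.mem_pyRange_one]; omega, ?_⟩
        rw [PySem.List.slice_to l (by omega), PySem.List.slice_from l (by omega)]
        simp only [Int.toNat_natCast]
        exact ⟨h1, h2⟩

-- ===== VERDICT (by name: the statement is the Claim_ definition above) =====
theorem is_double_palindrome_spec : Claim_equal_is_double_palindrome := by
  intro s _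
  show is_double_palindrome s = is_double_palindrome_alt s
  have := pvMain s.toList
  rwa [String.ofList_toList] at this
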